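-- pv_equiv track=rewrite | github.com/Shehaab/CodeSignal | AlternatingSums.py | alternatingSums
-- ===== SOURCE A (Python) =====
-- def alternatingSums(a):
--     """ Sums elements of an array into two teams, and returns an array with sums of two teams."""
--
--     # Holds the sums of two teams.
--     team1 = 0
--     team2 = 0
--
--     # Divide two teams, and add their sum.
--     for indx, val in enumerate(a):
--         if indx % 2 == 0:
--             team1 = team1 + val
--         else:
--             team2 = team2 + val
--
--     # Sum of two teams
--     b = [team1, team2]
--
--     return b
-- ===== SOURCE B (Python) =====
-- def alternatingSums(a):
--     """Fold the list back to front, swapping the (even, odd) accumulator pair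
--     at each element: no index or parity test is ever computed."""
--     e = o = 0
--     for x in reversed(a):
--         e, o = x + o, e
--     return [e, o]
-- ===== Notes on version B (the rewrite author's own statement) =====
-- stated objective: alternative
-- what changed: Replaced the forward enumerate loop with a parity branch by a back-to-front fold that swaps an (even,odd) accumulator pair at each element, so no index or parity test is ever computed.
import Mathlib
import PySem

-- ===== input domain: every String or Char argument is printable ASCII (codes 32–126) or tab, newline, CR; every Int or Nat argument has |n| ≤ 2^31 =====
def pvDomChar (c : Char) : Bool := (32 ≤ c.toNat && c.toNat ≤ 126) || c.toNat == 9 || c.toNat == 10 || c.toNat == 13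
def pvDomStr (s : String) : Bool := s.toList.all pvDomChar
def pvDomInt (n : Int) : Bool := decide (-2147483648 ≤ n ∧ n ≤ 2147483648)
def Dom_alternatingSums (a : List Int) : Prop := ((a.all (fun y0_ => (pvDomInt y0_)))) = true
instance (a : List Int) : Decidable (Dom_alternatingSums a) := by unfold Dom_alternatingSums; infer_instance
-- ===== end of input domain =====

-- B replaces the forward enumerate loop with a parity branch by a back-to-front
-- fold that swaps an (even, odd) accumulator pair at each element (alternative
-- decomposition, same O(n) cost).


-- ===== PORT A =====
-- for indx, val in enumerate(a): if indx % 2 == 0 then team1 += val else team2 += val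
def alternatingSums (a : List Int) : List Int :=
  let st := (PySem.List.enumerate a).foldl
    (fun (t : Int × Int) (p : Int × Int) =>
      if PySem.Int.mod p.1 2 = 0 then (t.1 + p.2, t.2) else (t.1, t.2 + p.2))
    (0, 0)
  [st.1, st.2]

-- ===== PORT B =====
-- for x in reversed(a): e, o = x + o, e
def alternatingSums_alt (a : List Int) : List Int :=
  let st := a.reverse.foldl (fun (p : Int × Int) (x : Int) => (x + p.2, p.1)) (0, 0)
  [st.1, st.2]

-- ===== PRECONDITION & SPEC =====
def Spec_alternatingSums (a : List Int) (out : List Int) : Prop := out = alternatingSums_alt a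
instance (a : List Int) (out : List Int) : Decidable (Spec_alternatingSums a out) := by unfold Spec_alternatingSums; infer_instance

-- ===== CLAIM (what is proved, stated in full; the proofs are below) =====
def Claim_equal_alternatingSums : Prop := ∀ (a : List Int), Dom_alternatingSums a → Spec_alternatingSums a (alternatingSums a)

-- ===== LEMMAS AND PROOFS =====

-- B's fold over the reversed list is the swap-foldr.
theorem alt_eq_foldr (a : List Int) :
    a.reverse.foldl (fun (p : Int × Int) (x : Int) => (x + p.2, p.1)) (0, 0)
      = a.foldr (fun (x : Int) (p : Int × Int) => (x + p.2, p.1)) (0, 0) := by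
  rw [List.foldl_reverse]

-- Python's % on a positive modulus is Lean's emod.
theorem pymod_two (t : Int) : PySem.Int.mod t 2 = t % 2 := by
  simp only [PySem.Int.mod]; rw [Int.fmod_eq_emod]; simp

-- A's enumerate-fold, started at index s with accumulator (t1, t2), in terms of
-- the swap-foldr: add its components straight or swapped according to s's parity.
theorem enum_foldl_eq (a : List Int) (s t1 t2 : Int) :
    (PySem.List.enumerate a s).foldl
      (fun (t : Int × Int) (p : Int × Int) =>
        if PySem.Int.mod p.1 2 = 0 then (t.1 + p.2, t.2) else (t.1, t.2 + p.2))
      (t1, t2)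
    = (if PySem.Int.mod s 2 = 0
        then (t1 + (a.foldr (fun x (p : Int × Int) => (x + p.2, p.1)) (0, 0)).1,
              t2 + (a.foldr (fun x (p : Int × Int) => (x + p.2, p.1)) (0, 0)).2)
        else (t1 + (a.foldr (fun x (p : Int × Int) => (x + p.2, p.1)) (0, 0)).2,
              t2 + (a.foldr (fun x (p : Int × Int) => (x + p.2, p.1)) (0, 0)).1)) := by
  induction a generalizing s t1 t2 with
  | nil => simp [PySem.List.enumerate_nil]
  | cons x xs ih =>
    rw [PySem.List.enumerate_cons, List.foldl_cons, List.foldr_cons]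
    by_cases h : s % 2 = 0
    · have hs : PySem.Int.mod s 2 = 0 := by rw [pymod_two]; exact h
      have hs1 : ¬ PySem.Int.mod (s + 1) 2 = 0 := by rw [pymod_two]; omega
      simp only [hs, ih, if_neg hs1]
      refine Prod.ext ?_ ?_ <;> simp <;> try ring
    · have hs : ¬ PySem.Int.mod s 2 = 0 := by rw [pymod_two]; exact h
      have hs1 : PySem.Int.mod (s + 1) 2 = 0 := by rw [pymod_two]; omega
      simp only [if_neg hs, ih, hs1]
      refine Prod.ext ?_ ?_ <;> simp <;> try ring

-- ===== VERDICT (by name: the statement is the Claim_ definition above) =====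
theorem alternatingSums_spec : Claim_equal_alternatingSums := by
  intro a _
  show _ = _
  simp only [alternatingSums, alternatingSums_alt, alt_eq_foldr,
    enum_foldl_eq a 0 0 0]
  norm_num [pymod_two]
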